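-- pv_equiv track=rewrite | github.com/sristi1407/enron-email-pipeline | utils/text_utils.py | separate_body_content
-- ===== SOURCE A (Python) =====
-- def separate_body_content(body_text: str) -> tuple:
--     """Separate body into main/forwarded/quoted content"""
--     if not body_text:
--         return None, None, None
--
--     lines = body_text.split('\n')
--     body_lines = []
--     quoted_lines = []
--     forwarded_text = ""
--     in_forwarded = False
--
--     for line in lines:
--         if line.strip().startswith('---') and 'Forwarded by' in line:
--             in_forwarded = True
--         elif line.strip().startswith('>'):
--             quoted_lines.append(line)
--         elif in_forwarded:
--             forwarded_text += line + '\n'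
--         else:
--             body_lines.append(line)
--
--     body = '\n'.join(body_lines).strip() or None
--     quoted = '\n'.join(quoted_lines).strip() or None
--     forwarded = forwarded_text.strip() or None
--
--     return body, forwarded, quoted
-- ===== SOURCE B (Python) =====
-- def separate_body_content(body_text: str) -> tuple:
--     """Separate body into main/forwarded/quoted content"""
--
--     def is_marker(line):
--         return line.strip().startswith('---') and 'Forwarded by' in line
--
--     def is_quote(line):
--         return line.strip().startswith('>')
--
--     lines = body_text.split('\n')
--     split = next((i for i, l in enumerate(lines) if is_marker(l)), len(lines))
--     body_lines = [l for l in lines[:split] if not is_marker(l) and not is_quote(l)]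
--     fwd_lines = [l for l in lines[split:] if not is_marker(l) and not is_quote(l)]
--     quoted_lines = [l for l in lines if not is_marker(l) and is_quote(l)]
--
--     return ('\n'.join(body_lines).strip() or None,
--             '\n'.join(fwd_lines).strip() or None,
--             '\n'.join(quoted_lines).strip() or None)
-- ===== Notes on version B (the rewrite author's own statement) =====
-- stated objective: alternative
-- what changed: Replaces the sticky in_forwarded flag state machine with finding the first forwarded-marker index once and then building the three sections by filtered slices (before/after the split), dropping the special empty-input guard.
import Mathlib
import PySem

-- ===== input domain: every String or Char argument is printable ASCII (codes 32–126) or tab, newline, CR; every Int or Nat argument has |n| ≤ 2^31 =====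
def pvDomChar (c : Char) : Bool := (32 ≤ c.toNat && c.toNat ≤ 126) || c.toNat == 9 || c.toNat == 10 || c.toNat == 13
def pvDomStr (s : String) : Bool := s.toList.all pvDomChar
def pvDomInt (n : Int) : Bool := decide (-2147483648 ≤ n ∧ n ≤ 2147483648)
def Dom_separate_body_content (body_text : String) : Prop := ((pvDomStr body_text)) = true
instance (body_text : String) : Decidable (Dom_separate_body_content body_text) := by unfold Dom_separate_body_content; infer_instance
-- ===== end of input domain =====

-- B replaces A's sticky in_forwarded flag state machine by one marker-index search plus three
-- filtered passes over slices of the line list (objective: alternative decomposition, same cost).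


-- shared by both ports: Python's `s.strip() or None` (empty string is falsy)
def pvOrNone (s : String) : Option String := if s == "" then none else some s

-- ===== PORT A =====
-- the loop body of A's for-loop, state = (body_lines, quoted_lines, forwarded_text, in_forwarded);
-- forwarded_text is kept as List Char (Python str concatenation `forwarded_text += line + '\n'`)
def pvStepA (st : List String × List String × List Char × Bool) (line : String) :
    List String × List String × List Char × Bool :=
  match st with
  | (bs, qs, fw, flag) =>
    if PySem.Str.startswith (PySem.Str.strip line) "---" && PySem.Str.isIn "Forwarded by" line then
      (bs, qs, fw, true)
    else if PySem.Str.startswith (PySem.Str.strip line) ">" then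
      (bs, qs ++ [line], fw, flag)
    else if flag then
      (bs, qs, fw ++ line.toList ++ ['\n'], flag)
    else
      (bs ++ [line], qs, fw, flag)

def separate_body_content (body_text : String) : Option String × Option String × Option String :=
  if body_text == "" then (none, none, none)
  else
    let lines := (PySem.Str.split? body_text "\n").getD []
    let st := lines.foldl pvStepA ([], [], [], false)
    (pvOrNone (PySem.Str.strip (PySem.Str.join "\n" st.1)),
     pvOrNone (String.ofList (PySem.Chars.strip st.2.2.1)),
     pvOrNone (PySem.Str.strip (PySem.Str.join "\n" st.2.1)))

-- ===== PORT B =====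
def pvMarker (line : String) : Bool :=
  PySem.Str.startswith (PySem.Str.strip line) "---" && PySem.Str.isIn "Forwarded by" line

def pvQuote (line : String) : Bool :=
  PySem.Str.startswith (PySem.Str.strip line) ">"

def separate_body_content_alt (body_text : String) : Option String × Option String × Option String :=
  let lines := (PySem.Str.split? body_text "\n").getD []
  let split := lines.findIdx pvMarker
  let body := (lines.take split).filter (fun l => !pvMarker l && !pvQuote l)
  let fwd := (lines.drop split).filter (fun l => !pvMarker l && !pvQuote l)
  let quoted := lines.filter (fun l => !pvMarker l && pvQuote l)
  (pvOrNone (PySem.Str.strip (PySem.Str.join "\n" body)),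
   pvOrNone (PySem.Str.strip (PySem.Str.join "\n" fwd)),
   pvOrNone (PySem.Str.strip (PySem.Str.join "\n" quoted)))

-- ===== PRECONDITION & SPEC =====
def Spec_separate_body_content (body_text : String) (out : Option String × Option String × Option String) : Prop := out = separate_body_content_alt body_text
instance (body_text : String) (out : Option String × Option String × Option String) : Decidable (Spec_separate_body_content body_text out) := by unfold Spec_separate_body_content; infer_instance

-- ===== CLAIM (what is proved, stated in full; the proofs are below) =====
def Claim_equal_separate_body_content : Prop := ∀ (body_text : String), Dom_separate_body_content body_text → Spec_separate_body_content body_text (separate_body_content body_text)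

-- ===== LEMMAS AND PROOFS =====

-- A's forwarded_text accumulation over a list of lines
def pvFlat (xs : List String) : List Char := xs.flatMap (fun l => l.toList ++ ['\n'])

theorem pvLoopTrue (lines : List String) (bs qs : List String) (fw : List Char) :
    lines.foldl pvStepA (bs, qs, fw, true) =
      (bs, qs ++ lines.filter (fun l => !pvMarker l && pvQuote l),
       fw ++ pvFlat (lines.filter (fun l => !pvMarker l && !pvQuote l)), true) := by
  induction lines generalizing qs fw with
  | nil => simp [pvFlat]
  | cons l rest ih =>
    by_cases hm : pvMarker l
    · have hm2 : (PySem.Str.startswith (PySem.Str.strip l) "---" && PySem.Str.isIn "Forwarded by" l) = true := hm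
      simp only [List.foldl_cons, pvStepA]
      rw [if_pos hm2, ih]
      simp [hm]
    · have hmF : pvMarker l = false := by simpa using hm
      have hm2 : (PySem.Str.startswith (PySem.Str.strip l) "---" && PySem.Str.isIn "Forwarded by" l) = false := hmF
      by_cases hq : pvQuote l
      · have hq2 : (PySem.Str.startswith (PySem.Str.strip l) ">") = true := hq
        simp only [List.foldl_cons, pvStepA]
        rw [hm2, hq2]
        simp only [Bool.false_eq_true, if_false, if_true, ih]
        simp [hmF, hq]
      · have hqF : pvQuote l = false := by simpa using hq
        have hq2 : (PySem.Str.startswith (PySem.Str.strip l) ">") = false := hqF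
        simp only [List.foldl_cons, pvStepA]
        rw [hm2, hq2]
        simp only [Bool.false_eq_true, if_false, if_true, ih]
        simp [hmF, hqF, pvFlat]

theorem pvLoopFalse (lines : List String) (bs qs : List String) (fw : List Char) :
    (lines.foldl pvStepA (bs, qs, fw, false)).1 =
        bs ++ ((lines.take (lines.findIdx pvMarker)).filter (fun l => !pvMarker l && !pvQuote l)) ∧
    (lines.foldl pvStepA (bs, qs, fw, false)).2.1 =
        qs ++ lines.filter (fun l => !pvMarker l && pvQuote l) ∧
    (lines.foldl pvStepA (bs, qs, fw, false)).2.2.1 =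
        fw ++ pvFlat ((lines.drop (lines.findIdx pvMarker)).filter (fun l => !pvMarker l && !pvQuote l)) := by
  induction lines generalizing bs qs fw with
  | nil => simp [pvFlat]
  | cons l rest ih =>
    by_cases hm : pvMarker l
    · have hm2 : (PySem.Str.startswith (PySem.Str.strip l) "---" && PySem.Str.isIn "Forwarded by" l) = true := hm
      simp only [List.foldl_cons, pvStepA]
      rw [if_pos hm2, pvLoopTrue]
      simp [List.findIdx_cons, hm]
    · have hmF : pvMarker l = false := by simpa using hm
      have hm2 : (PySem.Str.startswith (PySem.Str.strip l) "---" && PySem.Str.isIn "Forwarded by" l) = false := hmF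
      by_cases hq : pvQuote l
      · have hq2 : (PySem.Str.startswith (PySem.Str.strip l) ">") = true := hq
        simp only [List.foldl_cons, pvStepA]
        rw [hm2, hq2]
        simp only [Bool.false_eq_true, if_false, if_true]
        obtain ⟨i1, i2, i3⟩ := ih bs (qs ++ [l]) fw
        refine ⟨?_, ?_, ?_⟩ <;>
          simp [i1, i2, i3, List.findIdx_cons, hmF, hq]
      · have hqF : pvQuote l = false := by simpa using hq
        have hq2 : (PySem.Str.startswith (PySem.Str.strip l) ">") = false := hqF
        simp only [List.foldl_cons, pvStepA]
        rw [hm2, hq2]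
        simp only [Bool.false_eq_true, if_false]
        obtain ⟨i1, i2, i3⟩ := ih (bs ++ [l]) qs fw
        refine ⟨?_, ?_, ?_⟩ <;>
          simp [i1, i2, i3, List.findIdx_cons, hmF, hqF]

theorem pvIsspace_newline : PySem.Chars.isspace '\n' = true := by decide

theorem pvStrip_append_newline (x : List Char) :
    PySem.Chars.strip (x ++ ['\n']) = PySem.Chars.strip x := by
  simp only [PySem.Chars.strip, PySem.Chars.lstrip, PySem.Chars.rstrip, List.dropWhile_append]
  by_cases h : (List.dropWhile PySem.Chars.isspace x).isEmpty
  · rw [List.isEmpty_iff] at h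
    simp [h, List.dropWhile, pvIsspace_newline]
  · simp only [h, Bool.false_eq_true, if_false]
    rw [List.reverse_append]
    simp [pvIsspace_newline]

theorem pvFlat_cons (z : String) (zs : List String) :
    pvFlat (z :: zs) = PySem.Chars.join ['\n'] ((z :: zs).map String.toList) ++ ['\n'] := by
  induction zs generalizing z with
  | nil => simp [pvFlat, PySem.Chars.join, List.intercalate]
  | cons w ws ih =>
    calc pvFlat (z :: w :: ws) = z.toList ++ ['\n'] ++ pvFlat (w :: ws) := by
          simp [pvFlat]
      _ = z.toList ++ ['\n'] ++ (PySem.Chars.join ['\n'] ((w :: ws).map String.toList) ++ ['\n']) := by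
          rw [ih w]
      _ = PySem.Chars.join ['\n'] ((z :: w :: ws).map String.toList) ++ ['\n'] := by
          simp [PySem.Chars.join, List.intercalate]

theorem pvFlat_strip (xs : List String) :
    PySem.Chars.strip (pvFlat xs) = PySem.Chars.strip (PySem.Chars.join ['\n'] (xs.map String.toList)) := by
  cases xs with
  | nil => simp [pvFlat, PySem.Chars.join, List.intercalate]
  | cons z zs => rw [pvFlat_cons, pvStrip_append_newline]

theorem pvStr_join_toList (sep : String) (parts : List String) :
    (PySem.Str.join sep parts).toList = PySem.Chars.join sep.toList (parts.map String.toList) := by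
  simp [PySem.Str.join]

-- ===== VERDICT (by name: the statement is the Claim_ definition above) =====
theorem separate_body_content_spec : Claim_equal_separate_body_content := by
  intro body_text _
  unfold Spec_separate_body_content
  by_cases h : body_text = ""
  · subst h
    decide
  · simp only [separate_body_content, separate_body_content_alt]
    rw [if_neg (by simpa using h)]
    obtain ⟨h1, h2, h3⟩ := pvLoopFalse ((PySem.Str.split? body_text "\n").getD []) [] [] []
    simp only [List.nil_append] at h1 h2 h3
    simp only [h1, h2, h3, Prod.mk.injEq]
    refine ⟨trivial, ?_, trivial⟩
    simp only [PySem.Str.strip, pvStr_join_toList]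
    rw [show ("\n" : String).toList = ['\n'] from rfl, ← pvFlat_strip]
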